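-- pv_equiv track=rewrite | github.com/yriy14/labs-1-year-2-semester | src/lab_5_code.py | digit_value
-- ===== SOURCE A (Python) =====
-- def digit_value(ch):
--     digits = '0123456789'
--     i = 0
--     while i < length(digits):
--         if ch == digits[i]:
--             return i
--         i += 1
--     return -1
--
-- def length(s):
--     count = 0
--     for _ in s:
--         count += 1
--     return count
-- ===== SOURCE B (Python) =====
-- def digit_value(ch):
--     if isinstance(ch, str) and len(ch) == 1 and '0' <= ch <= '9':
--         return ord(ch) - ord('0')
--     return -1
-- ===== Notes on version B (the rewrite author's own statement) =====
-- stated objective: simpler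
-- what changed: Replaced the indexed while-loop scan over the ten digit characters (with a hand-rolled length helper) by a closed-form digit range check returning the code point minus the code point of the zero digit.
import Mathlib
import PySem

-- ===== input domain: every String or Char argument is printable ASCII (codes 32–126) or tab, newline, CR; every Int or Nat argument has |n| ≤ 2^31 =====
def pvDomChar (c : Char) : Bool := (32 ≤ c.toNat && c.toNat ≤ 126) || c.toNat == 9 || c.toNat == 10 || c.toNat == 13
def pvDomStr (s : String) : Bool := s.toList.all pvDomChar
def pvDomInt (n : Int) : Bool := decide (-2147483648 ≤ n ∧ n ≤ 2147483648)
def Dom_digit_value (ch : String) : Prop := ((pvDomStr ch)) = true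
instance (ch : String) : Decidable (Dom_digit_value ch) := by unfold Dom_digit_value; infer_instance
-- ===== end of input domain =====

-- B replaces A's indexed scan of '0123456789' (with a hand-rolled length helper) by a
-- closed-form range check and ord-arithmetic; objective: simpler, no loop.

-- ===== PORT A =====
-- port of A's helper 'length': counts elements with a fold, not List.length
def pyLength (s : List Char) : Int := s.foldl (fun c _ => c + 1) 0

lemma pyLength_digits : pyLength "0123456789".toList = 10 := by decide

-- the while-loop: i is the loop counter; ch == digits[i] compares ch with a 1-char string
def digit_value_go (cs : List Char) (i : Nat) : Int :=
  if (i : Int) < pyLength "0123456789".toList then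
    match PySem.List.pyGet? "0123456789".toList (i : Int) with
    | some d => if cs = [d] then (i : Int) else digit_value_go cs (i + 1)
    | none => -1  -- unreachable: i < len(digits)
  else -1
termination_by 10 - i
decreasing_by
  rename_i h
  rw [pyLength_digits] at h
  omega

def digit_value (ch : String) : Int := digit_value_go ch.toList 0

-- ===== PORT B =====
-- isinstance(ch, str) is always true on the String domain; len(ch)==1 and '0'<=ch<='9', then ord(ch)-ord('0')
def digit_value_alt (ch : String) : Int :=
  match ch.toList with
  | [c] => if '0' ≤ c ∧ c ≤ '9' then (c.toNat : Int) - 48 else -1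
  | _ => -1

-- ===== PRECONDITION & SPEC =====
def Spec_digit_value (ch : String) (out : Int) : Prop := out = digit_value_alt ch
instance (ch : String) (out : Int) : Decidable (Spec_digit_value ch out) := by unfold Spec_digit_value; infer_instance

-- ===== CLAIM (what is proved, stated in full; the proofs are below) =====
def Claim_equal_digit_value : Prop := ∀ (ch : String), Dom_digit_value ch → Spec_digit_value ch (digit_value ch)

-- ===== LEMMAS AND PROOFS =====
lemma char_eq_of_toNat (c d : Char) (h : c.toNat = d.toNat) : c = d := by
  have hv : c.val.toNat = d.val.toNat := h
  exact Char.ext (UInt32.toNat_inj.mp hv)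

lemma char10 (c : Char) (h1 : '0' ≤ c) (h2 : c ≤ '9') :
    c = '0' ∨ c = '1' ∨ c = '2' ∨ c = '3' ∨ c = '4' ∨
    c = '5' ∨ c = '6' ∨ c = '7' ∨ c = '8' ∨ c = '9' := by
  have h1' : 48 ≤ c.toNat := h1
  have h2' : c.toNat ≤ 57 := h2
  have h : c.toNat = 48 ∨ c.toNat = 49 ∨ c.toNat = 50 ∨ c.toNat = 51 ∨ c.toNat = 52 ∨
      c.toNat = 53 ∨ c.toNat = 54 ∨ c.toNat = 55 ∨ c.toNat = 56 ∨ c.toNat = 57 := by omega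
  rcases h with h|h|h|h|h|h|h|h|h|h <;>
    [exact Or.inl (char_eq_of_toNat c '0' h);
     exact Or.inr (Or.inl (char_eq_of_toNat c '1' h));
     exact Or.inr (Or.inr (Or.inl (char_eq_of_toNat c '2' h)));
     exact Or.inr (Or.inr (Or.inr (Or.inl (char_eq_of_toNat c '3' h))));
     exact Or.inr (Or.inr (Or.inr (Or.inr (Or.inl (char_eq_of_toNat c '4' h)))));
     exact Or.inr (Or.inr (Or.inr (Or.inr (Or.inr (Or.inl (char_eq_of_toNat c '5' h))))));
     exact Or.inr (Or.inr (Or.inr (Or.inr (Or.inr (Or.inr (Or.inl (char_eq_of_toNat c '6' h)))))));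
     exact Or.inr (Or.inr (Or.inr (Or.inr (Or.inr (Or.inr (Or.inr (Or.inl (char_eq_of_toNat c '7' h))))))));
     exact Or.inr (Or.inr (Or.inr (Or.inr (Or.inr (Or.inr (Or.inr (Or.inr (Or.inl (char_eq_of_toNat c '8' h)))))))));
     exact Or.inr (Or.inr (Or.inr (Or.inr (Or.inr (Or.inr (Or.inr (Or.inr (Or.inr (char_eq_of_toNat c '9' h)))))))))]

lemma go_eq_alt (cs : List Char) :
    digit_value_go cs 0 =
      (match cs with
       | [c] => if '0' ≤ c ∧ c ≤ '9' then (c.toNat : Int) - 48 else -1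
       | _ => -1) := by
  match cs with
  | [] =>
    simp [digit_value_go, pyLength, PySem.List.pyGet?, PySem.List.pyIdx?]
  | c :: d :: rest =>
    simp [digit_value_go, pyLength, PySem.List.pyGet?, PySem.List.pyIdx?]
  | [c] =>
    by_cases hg : '0' ≤ c ∧ c ≤ '9'
    · rcases char10 c hg.1 hg.2 with rfl|rfl|rfl|rfl|rfl|rfl|rfl|rfl|rfl|rfl <;>
        simp [digit_value_go, pyLength, PySem.List.pyGet?, PySem.List.pyIdx?]
    · have n0 : c ≠ '0' := by rintro rfl; exact hg (by decide)
      have n1 : c ≠ '1' := by rintro rfl; exact hg (by decide)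
      have n2 : c ≠ '2' := by rintro rfl; exact hg (by decide)
      have n3 : c ≠ '3' := by rintro rfl; exact hg (by decide)
      have n4 : c ≠ '4' := by rintro rfl; exact hg (by decide)
      have n5 : c ≠ '5' := by rintro rfl; exact hg (by decide)
      have n6 : c ≠ '6' := by rintro rfl; exact hg (by decide)
      have n7 : c ≠ '7' := by rintro rfl; exact hg (by decide)
      have n8 : c ≠ '8' := by rintro rfl; exact hg (by decide)
      have n9 : c ≠ '9' := by rintro rfl; exact hg (by decide)
      simp [digit_value_go, pyLength, PySem.List.pyGet?, PySem.List.pyIdx?, hg,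
        n0, n1, n2, n3, n4, n5, n6, n7, n8, n9]

-- ===== VERDICT (by name: the statement is the Claim_ definition above) =====
theorem digit_value_spec : Claim_equal_digit_value := by
  intro ch _
  unfold Spec_digit_value digit_value digit_value_alt
  exact go_eq_alt ch.toList
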